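-- pv_equiv track=rewrite | github.com/Dudley70/DocSyn | Old/ssot-17/scripts/merge_from_sourced.py | extract_excerpts
-- ===== SOURCE A (Python) =====
-- def extract_excerpts(md: str):
--     res = []
--     lead = "> **Sourced excerpt from:**"
--     if lead not in md: return res
--     parts = md.split(lead)
--     for i in range(1, len(parts)):
--         tail = parts[i]
--         seg = lead + tail.split("\n\n##", 1)[0].split("\n---", 1)[0]
--         res.append(seg.strip())
--     return res
-- ===== SOURCE B (Python) =====
-- def extract_excerpts(md: str):
--     LEAD = "> **Sourced excerpt from:**"
--     res = []
--     s = md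
--     while True:
--         i = s.find(LEAD)
--         if i == -1:
--             return res
--         tail = s[i + len(LEAD):]
--         cut = len(tail)
--         for m in ("\n\n##", "\n---", LEAD):
--             j = tail.find(m)
--             if j != -1 and j < cut:
--                 cut = j
--         res.append((LEAD + tail[:cut]).strip())
--         s = tail
-- ===== Notes on version B (the rewrite author's own statement) =====
-- stated objective: alternative
-- what changed: Replaced the global split-by-lead plus per-part nested single splits with one find-driven scan over the string: each segment is cut at the minimum of the first positions of the two boundary markers and the next lead occurrence.
import Mathlib
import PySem

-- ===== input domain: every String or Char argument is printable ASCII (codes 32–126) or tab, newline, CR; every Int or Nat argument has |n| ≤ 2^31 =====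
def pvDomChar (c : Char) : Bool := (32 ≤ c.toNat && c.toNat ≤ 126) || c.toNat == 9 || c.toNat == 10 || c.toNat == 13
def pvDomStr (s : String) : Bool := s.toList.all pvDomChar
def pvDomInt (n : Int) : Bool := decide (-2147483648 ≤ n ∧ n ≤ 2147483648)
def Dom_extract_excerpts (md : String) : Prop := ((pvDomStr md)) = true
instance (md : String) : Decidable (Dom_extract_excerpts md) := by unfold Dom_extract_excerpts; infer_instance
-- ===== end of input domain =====

-- B replaces A's global split-by-lead plus nested split(...,1) cuts with a single find-driven
-- scan cutting each segment at the minimum of the marker/next-lead positions (objective: alternative).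

-- the three literal strings of the Python, as code-point lists
def pvLead : List Char := ['>', ' ', '*', '*', 'S', 'o', 'u', 'r', 'c', 'e', 'd', ' ', 'e', 'x', 'c', 'e', 'r', 'p', 't', ' ', 'f', 'r', 'o', 'm', ':', '*', '*']
def pvM1 : List Char := ['\n', '\n', '#', '#']
def pvM2 : List Char := ['\n', '-', '-', '-']

-- a found pattern occupies [find, find+len) inside the string (cited by pvBGo's decreasing_by)
theorem pv_find_occ (s sub : List Char) (h : ¬ PySem.Chars.find s sub = -1) :
    (PySem.Chars.find s sub).toNat + sub.length ≤ s.length := by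
  have hge := PySem.Chars.neg_one_le_find s sub
  have h0 : 0 ≤ PySem.Chars.find s sub := by omega
  have hsp := (PySem.Chars.find_spec h0).1
  have := hsp.length_le
  simp only [List.length_drop] at this
  have hle := PySem.Chars.find_le_length s sub
  omega

-- ===== PORT A =====
-- tail.split("\n\n##", 1)[0].split("\n---", 1)[0]: the separators are non-empty so split
-- never returns None (getD []), and [0] is total on split's always-non-empty result (headI)
def pvCutA (tail : List Char) : List Char :=
  (((PySem.Chars.splitMax? (((PySem.Chars.splitMax? tail pvM1 1).getD []).headI) pvM2 1).getD []).headI)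

def extract_excerpts (md : String) : List String :=
  if PySem.Chars.isIn pvLead md.toList = false then []
  else
    -- parts = md.split(lead); the lead is non-empty so split? is never None
    let parts := (PySem.Chars.split? md.toList pvLead).getD []
    -- for i in range(1, len(parts)): res.append((lead + …).strip())
    ((parts.drop 1).map (fun tail => PySem.Chars.strip (pvLead ++ pvCutA tail))).map String.ofList

-- ===== PORT B =====
-- cut = len(tail); for m in (m1, m2, lead): j = tail.find(m); if j != -1 and j < cut: cut = j
def pvCutB (tail : List Char) : Int :=
  [pvM1, pvM2, pvLead].foldl (fun cut m =>
    if PySem.Chars.find tail m ≠ -1 ∧ PySem.Chars.find tail m < cut then PySem.Chars.find tail m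
    else cut) (tail.length : Int)

-- the while loop of Source B, recursing on the suffix after each lead occurrence
def pvBGo (s : List Char) : List (List Char) :=
  if h : PySem.Chars.find s pvLead = -1 then []
  else
    let tail := s.drop ((PySem.Chars.find s pvLead).toNat + pvLead.length)
    PySem.Chars.strip (pvLead ++ PySem.List.slice tail none (some (pvCutB tail))) :: pvBGo tail
termination_by s.length
decreasing_by
  have := pv_find_occ s pvLead h
  simp only [List.length_drop]
  have hl : pvLead.length = 27 := by decide
  omega

def extract_excerpts_alt (md : String) : List String := (pvBGo md.toList).map String.ofList

-- ===== PRECONDITION & SPEC =====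
def Spec_extract_excerpts (md : String) (out : List String) : Prop := out = extract_excerpts_alt md
instance (md : String) (out : List String) : Decidable (Spec_extract_excerpts md out) := by unfold Spec_extract_excerpts; infer_instance

-- ===== CLAIM (what is proved, stated in full; the proofs are below) =====
def Claim_equal_extract_excerpts : Prop := ∀ (md : String), Dom_extract_excerpts md → Spec_extract_excerpts md (extract_excerpts md)

-- ===== LEMMAS AND PROOFS =====

def pvPos (t m : List Char) : Nat :=
  if PySem.Chars.find t m = -1 then t.length else (PySem.Chars.find t m).toNat

def pvSplitAux (sep t : List Char) : List (List Char) :=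
  if h : sep = [] ∨ PySem.Chars.find t sep = -1 then [t]
  else t.take (PySem.Chars.find t sep).toNat ::
       pvSplitAux sep (t.drop ((PySem.Chars.find t sep).toNat + sep.length))
termination_by t.length
decreasing_by
  rw [not_or] at h
  have h2 := pv_find_occ t sep h.2
  have h3 : 1 ≤ sep.length := by
    cases hs : sep
    · exact absurd hs h.1
    · simp
  simp only [List.length_drop]
  omega

theorem findGo_eq (sub l : List Char) (k : Nat) :
    PySem.Chars.find.go sub l k =
      if PySem.Chars.find l sub = -1 then -1 else PySem.Chars.find l sub + k := by
  induction l generalizing k with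
  | nil => simp [PySem.Chars.find.go, PySem.Chars.find]; split <;> simp
  | cons c rest ih =>
    rw [PySem.Chars.find.go]
    by_cases hp : sub.isPrefixOf (c :: rest) = true
    · simp [hp, PySem.Chars.find, PySem.Chars.find.go]
    · have hf : PySem.Chars.find (c :: rest) sub =
          if PySem.Chars.find rest sub = -1 then -1 else PySem.Chars.find rest sub + 1 := by
        show PySem.Chars.find.go sub (c :: rest) 0 = _
        rw [PySem.Chars.find.go]
        simp [hp, ih]
      have hge := PySem.Chars.neg_one_le_find rest sub
      simp only [hp, ih, hf]
      by_cases h : PySem.Chars.find rest sub = -1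
      · simp [h]
      · simp only [if_neg h]
        rw [if_neg (show ¬(PySem.Chars.find rest sub + 1 = -1) by omega)]
        push_cast
        omega

theorem find_cons_not_prefix (sep : List Char) (c : Char) (rest : List Char)
    (hp : ¬ sep.isPrefixOf (c :: rest) = true) :
    PySem.Chars.find (c :: rest) sep =
      if PySem.Chars.find rest sep = -1 then -1 else PySem.Chars.find rest sep + 1 := by
  show PySem.Chars.find.go sep (c :: rest) 0 = _
  rw [PySem.Chars.find.go]
  simp [hp, findGo_eq]

theorem find_cons_prefix (sep : List Char) (c : Char) (rest : List Char)
    (hp : sep.isPrefixOf (c :: rest) = true) :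
    PySem.Chars.find (c :: rest) sep = 0 := by
  show PySem.Chars.find.go sep (c :: rest) 0 = _
  rw [PySem.Chars.find.go]
  simp [hp]

theorem find_nil_of_ne (sep : List Char) (hsep : sep ≠ []) : PySem.Chars.find [] sep = -1 := by
  show PySem.Chars.find.go sep [] 0 = _
  rw [PySem.Chars.find.go]
  simp [hsep]

theorem splitOnGo_eq (sep : List Char) (hsep : sep ≠ []) (fuel : Nat) :
    ∀ (l cur : List Char) (acc : List (List Char)), l.length ≤ fuel →
      PySem.Chars.splitOn.go sep fuel l cur acc =
        acc.reverse ++ (pvSplitAux sep l).modifyHead (fun x => cur.reverse ++ x) := by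
  have hslen : 1 ≤ sep.length := List.length_pos_iff.mpr hsep
  induction fuel with
  | zero =>
    intro l cur acc hl
    have : l = [] := by cases l <;> simp at hl ⊢
    subst this
    rw [PySem.Chars.splitOn.go]
    rw [pvSplitAux, dif_pos (Or.inr (find_nil_of_ne sep hsep))]
    simp
  | succ fuel ih =>
    intro l cur acc hl
    cases l with
    | nil =>
      rw [PySem.Chars.splitOn.go]
      · rw [pvSplitAux, dif_pos (Or.inr (find_nil_of_ne sep hsep))]
        simp
      · omega
    | cons c rest =>
      rw [PySem.Chars.splitOn.go]
      by_cases hp : sep.isPrefixOf (c :: rest) = true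
      · rw [if_pos hp]
        rw [ih _ _ _ (by simp at hl ⊢; omega)]
        have hfind := find_cons_prefix sep c rest hp
        have e1 : pvSplitAux sep (c :: rest) =
            [] :: pvSplitAux sep ((c :: rest).drop sep.length) := by
          rw [pvSplitAux, dif_neg (by rw [hfind]; simp [hsep])]
          rw [hfind]
          simp
        rw [e1]
        simp only [List.modifyHead_cons, List.reverse_cons, List.append_assoc,
          List.nil_append, List.append_nil, List.singleton_append]
        cases hsp : pvSplitAux sep (List.drop sep.length (c :: rest)) <;> simp
      · rw [if_neg hp]
        rw [ih _ _ _ (by simp at hl ⊢; omega)]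
        have hfind := find_cons_not_prefix sep c rest hp
        by_cases hr : PySem.Chars.find rest sep = -1
        · have e1 : pvSplitAux sep (c :: rest) = [c :: rest] := by
            rw [pvSplitAux, dif_pos (Or.inr (by rw [hfind, if_pos hr]))]
          have e2 : pvSplitAux sep rest = [rest] := by
            rw [pvSplitAux, dif_pos (Or.inr hr)]
          rw [e1, e2]
          simp
        · have hge := PySem.Chars.neg_one_le_find rest sep
          have hfl : PySem.Chars.find (c :: rest) sep = PySem.Chars.find rest sep + 1 := by
            rw [hfind, if_neg hr]
          have ht : (PySem.Chars.find (c :: rest) sep).toNat =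
              (PySem.Chars.find rest sep).toNat + 1 := by rw [hfl]; omega
          have e1 : pvSplitAux sep (c :: rest) =
              (c :: rest.take (PySem.Chars.find rest sep).toNat) ::
                pvSplitAux sep (rest.drop ((PySem.Chars.find rest sep).toNat + sep.length)) := by
            rw [pvSplitAux, dif_neg (by rw [hfl]; intro h; rcases h with h | h; exacts [hsep h, by omega])]
            rw [ht, List.take_succ_cons]
            rw [show (PySem.Chars.find rest sep).toNat + 1 + sep.length =
                  ((PySem.Chars.find rest sep).toNat + sep.length) + 1 from by omega,
                List.drop_succ_cons]
          have e2 : pvSplitAux sep rest =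
              rest.take (PySem.Chars.find rest sep).toNat ::
                pvSplitAux sep (rest.drop ((PySem.Chars.find rest sep).toNat + sep.length)) := by
            rw [pvSplitAux, dif_neg (by intro h; rcases h with h | h; exacts [hsep h, hr h])]
          rw [e1, e2]
          simp

theorem splitOn_eq (sep l : List Char) (hsep : sep ≠ []) :
    PySem.Chars.splitOn l sep = pvSplitAux sep l := by
  rw [PySem.Chars.splitOn]
  rw [splitOnGo_eq sep hsep _ l [] [] (by omega)]
  cases h : pvSplitAux sep l <;> simp

theorem splitOnMaxGo_zero (sep : List Char) (fuel : Nat) (l cur : List Char) (acc : List (List Char)) :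
    PySem.Chars.splitOnMax.go sep fuel 0 l cur acc = ((cur.reverse ++ l) :: acc).reverse := by
  cases fuel with
  | zero => rw [PySem.Chars.splitOnMax.go]
  | succ f =>
    cases l with
    | nil =>
      rw [PySem.Chars.splitOnMax.go]
      · simp
      · omega
    | cons c r =>
      rw [PySem.Chars.splitOnMax.go]
      rw [if_pos rfl]

theorem splitOnMaxGo_one (sep : List Char) (hsep : sep ≠ []) (fuel : Nat) :
    ∀ (l cur : List Char) (acc : List (List Char)), l.length ≤ fuel →
      PySem.Chars.splitOnMax.go sep fuel 1 l cur acc =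
        acc.reverse ++ (if PySem.Chars.find l sep = -1 then [cur.reverse ++ l]
          else [cur.reverse ++ l.take (PySem.Chars.find l sep).toNat,
                l.drop ((PySem.Chars.find l sep).toNat + sep.length)]) := by
  have hslen : 1 ≤ sep.length := List.length_pos_iff.mpr hsep
  induction fuel with
  | zero =>
    intro l cur acc hl
    have : l = [] := by cases l <;> simp at hl ⊢
    subst this
    rw [PySem.Chars.splitOnMax.go]
    rw [if_pos (find_nil_of_ne sep hsep)]
    simp
  | succ fuel ih =>
    intro l cur acc hl
    cases l with
    | nil =>
      rw [PySem.Chars.splitOnMax.go]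
      · rw [if_pos (find_nil_of_ne sep hsep)]
        simp
      · omega
    | cons c rest =>
      rw [PySem.Chars.splitOnMax.go]
      rw [if_neg (by omega)]
      by_cases hp : sep.isPrefixOf (c :: rest) = true
      · rw [if_pos hp]
        rw [show (1 : Nat) - 1 = 0 from rfl, splitOnMaxGo_zero]
        have hfind := find_cons_prefix sep c rest hp
        rw [if_neg (by rw [hfind]; simp)]
        rw [hfind]
        simp
      · rw [if_neg hp]
        rw [ih _ _ _ (by simp at hl ⊢; omega)]
        have hfind := find_cons_not_prefix sep c rest hp
        by_cases hr : PySem.Chars.find rest sep = -1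
        · rw [if_pos hr, if_pos (by rw [hfind, if_pos hr])]
          simp
        · have hge := PySem.Chars.neg_one_le_find rest sep
          have hfl : PySem.Chars.find (c :: rest) sep = PySem.Chars.find rest sep + 1 := by
            rw [hfind, if_neg hr]
          rw [if_neg hr, if_neg (by rw [hfl]; omega)]
          rw [hfl]
          rw [show (PySem.Chars.find rest sep + 1).toNat = (PySem.Chars.find rest sep).toNat + 1 from by omega]
          rw [List.take_succ_cons]
          rw [show (PySem.Chars.find rest sep).toNat + 1 + sep.length =
                ((PySem.Chars.find rest sep).toNat + sep.length) + 1 from by omega,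
              List.drop_succ_cons]
          simp

theorem splitOnMax_one_headI (sep l : List Char) (hsep : sep ≠ []) :
    (PySem.Chars.splitOnMax l sep 1).headI = l.take (pvPos l sep) := by
  rw [PySem.Chars.splitOnMax, if_neg (by omega)]
  rw [show (1 : Int).toNat = 1 from rfl]
  rw [splitOnMaxGo_one sep hsep _ l [] [] (by omega)]
  unfold pvPos
  by_cases h : PySem.Chars.find l sep = -1
  · simp [h]
  · simp [h]

theorem cutA_eq (t : List Char) :
    pvCutA t = (t.take (pvPos t pvM1)).take (pvPos (t.take (pvPos t pvM1)) pvM2) := by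
  unfold pvCutA
  rw [PySem.Chars.splitMax?, if_neg (by decide)]
  rw [PySem.Chars.splitMax?, if_neg (by decide)]
  simp only [Option.getD_some]
  rw [splitOnMax_one_headI pvM1 t (by decide)]
  rw [splitOnMax_one_headI pvM2 _ (by decide)]

theorem cutB_eq (t : List Char) :
    pvCutB t = ((min (min (pvPos t pvM1) (pvPos t pvM2)) (pvPos t pvLead) : Nat) : Int) := by
  have g1 := PySem.Chars.neg_one_le_find t pvM1
  have g2 := PySem.Chars.neg_one_le_find t pvM2
  have g3 := PySem.Chars.neg_one_le_find t pvLead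
  have l1 := PySem.Chars.find_le_length t pvM1
  have l2 := PySem.Chars.find_le_length t pvM2
  have l3 := PySem.Chars.find_le_length t pvLead
  have o1 : ¬ PySem.Chars.find t pvM1 = -1 → (PySem.Chars.find t pvM1).toNat + pvM1.length ≤ t.length := pv_find_occ t pvM1
  have o2 : ¬ PySem.Chars.find t pvM2 = -1 → (PySem.Chars.find t pvM2).toNat + pvM2.length ≤ t.length := pv_find_occ t pvM2
  have o3 : ¬ PySem.Chars.find t pvLead = -1 → (PySem.Chars.find t pvLead).toNat + pvLead.length ≤ t.length := pv_find_occ t pvLead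
  have hm1 : pvM1.length = 4 := by decide
  have hm2 : pvM2.length = 4 := by decide
  have hm3 : pvLead.length = 27 := by decide
  simp only [pvCutB, List.foldl_cons, List.foldl_nil]
  unfold pvPos
  split_ifs <;> push_cast <;> omega

theorem pv_no_straddle (t m w : List Char) (p q : Nat) (hw : w <+: t.drop p) (hwne : w ≠ [])
    (hocc : m <+: t.drop q) (h1 : q < p) (h2 : p < q + m.length)
    (hdiff : ∀ c ∈ m.tail, c ≠ w.headI) : False := by
  have hi : p - q < m.length := by omega
  obtain ⟨r1, hr1⟩ := hocc
  obtain ⟨r2, hr2⟩ := hw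
  have e1 : t[p]? = m[p - q]? := by
    calc t[p]? = (t.drop q)[p - q]? := by rw [List.getElem?_drop]; congr 1; omega
    _ = (m ++ r1)[p - q]? := by rw [hr1]
    _ = m[p - q]? := List.getElem?_append_left hi
  have e2 : t[p]? = some w.headI := by
    have h0 : 0 < w.length := List.length_pos_iff.mpr hwne
    calc t[p]? = (t.drop p)[0]? := by rw [List.getElem?_drop]; congr 1
    _ = (w ++ r2)[0]? := by rw [hr2]
    _ = w[0]? := List.getElem?_append_left h0
    _ = some w.headI := by
      cases w
      · exact absurd rfl hwne
      · simp
  have e3 : m.tail[p - q - 1]? = m[p - q]? := by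
    rw [List.getElem?_tail]
    congr 1
    omega
  have hmem : w.headI ∈ m.tail := by
    apply List.mem_of_getElem? (i := p - q - 1)
    rw [e3, ← e1, e2]
  exact hdiff _ hmem rfl

theorem prefix_occ {t m : List Char} {p q : Nat} (hml : 0 < m.length) (h : m <+: (t.take p).drop q) : m <+: t.drop q ∧ m.length + q ≤ p := by
  rw [List.drop_take] at h
  rw [List.prefix_take_iff] at h
  exact ⟨h.1, by have := h.2; omega⟩

theorem prefix_pos (t m : List Char) (p : Nat) (hm : m ≠ []) (hp : p ≤ t.length)
    (hstr : ∀ q, m <+: t.drop q → q + m.length ≤ p ∨ p ≤ q) :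
    pvPos (t.take p) m = min (pvPos t m) p := by
  have hml : 0 < m.length := List.length_pos_iff.mpr hm
  by_cases hf : PySem.Chars.find t m = -1
  · have hf' : PySem.Chars.find (t.take p) m = -1 := by
      rw [PySem.Chars.find_eq_neg_one_iff] at hf ⊢
      intro hinf
      exact hf (hinf.trans (List.take_prefix p t).isInfix)
    simp [pvPos, hf, hf', List.length_take]
    omega
  · have h0 : 0 ≤ PySem.Chars.find t m := by
      have := PySem.Chars.neg_one_le_find t m; omega
    obtain ⟨hoccj, hminj⟩ := PySem.Chars.find_spec h0
    have hjlen := pv_find_occ t m hf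
    rcases hstr _ hoccj with hfit | hge
    · -- occurrence fits inside the prefix: same first position
      have hocc' : m <+: (t.take p).drop (PySem.Chars.find t m).toNat := by
        rw [List.drop_take, List.prefix_take_iff]
        exact ⟨hoccj, by omega⟩
      have hne' : ¬ PySem.Chars.find (t.take p) m = -1 := by
        rw [PySem.Chars.find_eq_neg_one_iff]
        intro hno
        exact hno (hocc'.isInfix.trans (List.drop_suffix _ _).isInfix)
      have h0' : 0 ≤ PySem.Chars.find (t.take p) m := by
        have := PySem.Chars.neg_one_le_find (t.take p) m; omega
      obtain ⟨hoccj', hminj'⟩ := PySem.Chars.find_spec h0'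
      have heq : (PySem.Chars.find (t.take p) m).toNat = (PySem.Chars.find t m).toNat := by
        rcases Nat.lt_trichotomy (PySem.Chars.find (t.take p) m).toNat (PySem.Chars.find t m).toNat with h | h | h
        · exact absurd (prefix_occ hml hoccj').1 (hminj _ h)
        · exact h
        · exact absurd hocc' (hminj' _ h)
      simp [pvPos, hf, hne', heq]
      omega
    · -- the first (and every) occurrence starts at or after p: absent from the prefix
      have hf' : PySem.Chars.find (t.take p) m = -1 := by
        rw [PySem.Chars.find_eq_neg_one_iff]
        intro hinf
        obtain ⟨q, hq⟩ := (PySem.Chars.exists_prefix_drop_iff_isIn m (t.take p)).mpr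
          ((PySem.Chars.isIn_iff_infix m (t.take p)).mpr hinf)
        obtain ⟨hq1, hq2⟩ := prefix_occ hml hq
        have := hminj q
        by_cases hlt : q < (PySem.Chars.find t m).toNat
        · exact this hlt hq1
        · omega
      simp [pvPos, hf, hf', List.length_take]
      omega

theorem hstr_of_occ (t m w : List Char) (p : Nat) (hw : w <+: t.drop p) (hwne : w ≠ [])
    (hdiff : ∀ c ∈ m.tail, c ≠ w.headI) :
    ∀ q, m <+: t.drop q → q + m.length ≤ p ∨ p ≤ q := by
  intro q hq
  by_cases hle : p ≤ q
  · right; exact hle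
  · left
    by_contra h2
    exact pv_no_straddle t m w p q hw hwne hq (by omega) (by omega) hdiff

theorem hstr_len (t m : List Char) :
    ∀ q, m <+: t.drop q → q + m.length ≤ t.length ∨ t.length ≤ q := by
  intro q hq
  have := hq.length_le
  simp only [List.length_drop] at this
  omega

theorem pv_pos_le (t m : List Char) : pvPos t m ≤ t.length := by
  unfold pvPos
  split
  · exact le_rfl
  · have := PySem.Chars.find_le_length t m
    have := PySem.Chars.neg_one_le_find t m
    omega

theorem pos_occ (t m : List Char) (h : pvPos t m < t.length) : m <+: t.drop (pvPos t m) := by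
  unfold pvPos at *
  by_cases hf : PySem.Chars.find t m = -1
  · simp [hf] at h
  · have h0 : 0 ≤ PySem.Chars.find t m := by
      have := PySem.Chars.neg_one_le_find t m; omega
    simp only [hf] at *
    exact (PySem.Chars.find_spec h0).1

theorem piece_eq (t : List Char) :
    pvCutA (t.take (pvPos t pvLead)) =
      t.take (min (min (pvPos t pvM1) (pvPos t pvM2)) (pvPos t pvLead)) := by
  rw [cutA_eq]
  have hpLle : pvPos t pvLead ≤ t.length := pv_pos_le t pvLead
  have hstrL : ∀ m : List Char, (∀ c ∈ m.tail, c ≠ '>') →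
      ∀ q, m <+: t.drop q → q + m.length ≤ pvPos t pvLead ∨ pvPos t pvLead ≤ q := by
    intro m hm q hq
    by_cases hbound : pvPos t pvLead < t.length
    · exact hstr_of_occ t m pvLead (pvPos t pvLead) (pos_occ t pvLead hbound) (by decide)
        (by intro c hc; rw [show pvLead.headI = '>' from by decide]; exact hm c hc) q hq
    · have he : pvPos t pvLead = t.length := by omega
      rw [he]
      exact hstr_len t m q hq
  have e1 : pvPos (t.take (pvPos t pvLead)) pvM1 = min (pvPos t pvM1) (pvPos t pvLead) :=
    prefix_pos t pvM1 (pvPos t pvLead) (by decide) hpLle (hstrL pvM1 (by intro c hc; simp [pvM1] at hc; rcases hc with rfl | rfl | rfl <;> decide))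
  rw [e1]
  simp only [List.take_take]
  have hminle : min (pvPos t pvM1) (pvPos t pvLead) ≤ t.length :=
    le_trans (min_le_right _ _) hpLle
  have hstr2 : ∀ q, pvM2 <+: t.drop q →
      q + pvM2.length ≤ min (min (pvPos t pvM1) (pvPos t pvLead)) (pvPos t pvLead) ∨
        min (min (pvPos t pvM1) (pvPos t pvLead)) (pvPos t pvLead) ≤ q := by
    have hsimp : min (min (pvPos t pvM1) (pvPos t pvLead)) (pvPos t pvLead) =
        min (pvPos t pvM1) (pvPos t pvLead) := by omega
    rw [hsimp]
    rcases Nat.lt_or_ge (pvPos t pvM1) (pvPos t pvLead) with h | h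
    · rw [min_eq_left (Nat.le_of_lt h)]
      have hb : pvPos t pvM1 < t.length := by omega
      exact hstr_of_occ t pvM2 pvM1 (pvPos t pvM1) (pos_occ t pvM1 hb) (by decide)
        (by intro c hc
            rw [show pvM1.headI = '\n' from by decide]
            have hall : ∀ x ∈ pvM2.tail, x ≠ '\n' := by intro x hx; simp [pvM2] at hx; rcases hx with rfl | rfl | rfl <;> decide
            exact hall c hc)
    · rw [min_eq_right h]
      exact hstrL pvM2 (by intro c hc; simp [pvM2] at hc; rcases hc with rfl | rfl | rfl <;> decide)
  have e2 := prefix_pos t pvM2 (min (min (pvPos t pvM1) (pvPos t pvLead)) (pvPos t pvLead))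
    (by decide) (by omega) hstr2
  rw [e2]
  congr 1
  omega

theorem pvSplitAux_head (sep t : List Char) (hsep : sep ≠ []) :
    pvSplitAux sep t = t.take (pvPos t sep) :: (pvSplitAux sep t).drop 1 := by
  rw [pvSplitAux]
  by_cases hf : PySem.Chars.find t sep = -1
  · rw [dif_pos (Or.inr hf)]
    unfold pvPos
    simp [hf]
  · rw [dif_neg (by intro h; rcases h with h | h; exacts [hsep h, hf h])]
    unfold pvPos
    simp [hf]

theorem slice_cutB (tail : List Char) :
    PySem.List.slice tail none (some (pvCutB tail)) =
      tail.take (min (min (pvPos tail pvM1) (pvPos tail pvM2)) (pvPos tail pvLead)) := by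
  rw [cutB_eq]
  rw [PySem.List.slice_to tail (by positivity)]
  simp
  omega

theorem pvBGo_eq (s : List Char) :
    pvBGo s = ((pvSplitAux pvLead s).drop 1).map
      (fun tail => PySem.Chars.strip (pvLead ++ pvCutA tail)) := by
  have hmain : ∀ (n : Nat) (s : List Char), s.length ≤ n →
      pvBGo s = ((pvSplitAux pvLead s).drop 1).map
        (fun tail => PySem.Chars.strip (pvLead ++ pvCutA tail)) := by
    intro n
    induction n with
    | zero =>
      intro s hs
      have : s = [] := by cases s <;> simp at hs ⊢
      subst this
      rw [pvBGo, dif_pos (find_nil_of_ne pvLead (by decide))]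
      rw [pvSplitAux, dif_pos (Or.inr (find_nil_of_ne pvLead (by decide)))]
      simp
    | succ n ih =>
      intro s hs
      rw [pvBGo]
      by_cases hf : PySem.Chars.find s pvLead = -1
      · rw [dif_pos hf]
        rw [pvSplitAux, dif_pos (Or.inr hf)]
        simp
      · rw [dif_neg hf]
        have hocc := pv_find_occ s pvLead hf
        have hll : pvLead.length = 27 := by decide
        rw [pvSplitAux, dif_neg (by intro h; rcases h with h | h; exacts [by revert h; decide, hf h])]
        simp only [List.drop_succ_cons, List.drop_zero]
        rw [ih _ (by simp only [List.length_drop]; omega)]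
        rw [pvSplitAux_head pvLead _ (by decide)]
        simp only [List.map_cons]
        congr 1
        rw [slice_cutB, ← piece_eq]
  exact hmain s.length s le_rfl

-- ===== VERDICT (by name: the statement is the Claim_ definition above) =====
theorem extract_excerpts_spec : Claim_equal_extract_excerpts := by
  intro md _
  unfold Spec_extract_excerpts extract_excerpts extract_excerpts_alt
  by_cases hin : PySem.Chars.isIn pvLead md.toList = false
  · rw [if_pos hin]
    have hf : PySem.Chars.find md.toList pvLead = -1 := by
      rw [PySem.Chars.find_eq_neg_one_iff]
      exact (PySem.Chars.isIn_eq_false_iff pvLead md.toList).mp hin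
    rw [pvBGo, dif_pos hf]
    simp
  · rw [if_neg hin]
    rw [PySem.Chars.split?, if_neg (by decide)]
    simp only [Option.getD_some]
    rw [splitOn_eq pvLead md.toList (by decide)]
    rw [pvBGo_eq]
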